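-- pv_equiv track=rewrite | github.com/cvwifi-lab/WiVi32-A_People_Counting_Tool | preprocessing.py | remove_consecutive_zeros
-- ===== SOURCE A (Python) =====
-- def remove_consecutive_zeros(data_list, min_consecutive=5):
--     """
--     Loại bỏ các dải số 0 liền kề (từ min_consecutive số 0 trở lên)
--     """
--     if not data_list:
--         return data_list
--
--     result = []
--     zero_count = 0
--     temp_zeros = []
--
--     for value in data_list:
--         if value == 0:
--             zero_count += 1
--             temp_zeros.append(value)
--         else:
--             # Nếu có ít hơn min_consecutive số 0, giữ lại
--             if zero_count > 0 and zero_count < min_consecutive: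
--                 result.extend(temp_zeros)
--             # Reset counter
--             zero_count = 0
--             temp_zeros = []
--             result.append(value)
--
--     # Xử lý dải 0 cuối cùng
--     if zero_count > 0 and zero_count < min_consecutive:
--         result.extend(temp_zeros)
--
--     return result
-- ===== SOURCE B (Python) =====
-- def remove_consecutive_zeros(data_list, min_consecutive=5):
--     if not data_list:
--         return data_list
--     # Stage 1: run-length decompose into maximal runs of equal zero-ness.
--     runs = []
--     cur = [data_list[0]]
--     for v in data_list[1:]:
--         if (v == 0) == (cur[0] == 0):
--             cur.append(v)
--         else:
--             runs.append(cur)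
--             cur = [v]
--     runs.append(cur)
--     # Stage 2: keep every non-zero run and every short zero run.
--     out = []
--     for run in runs:
--         if run[0] != 0 or len(run) < min_consecutive:
--             out += run
--     return out
-- ===== Notes on version B (the rewrite author's own statement) =====
-- stated objective: alternative
-- what changed: Replaced A's single-pass counter/buffer state machine (flush temp_zeros on each non-zero) by a staged pipeline: first run-length decompose the list into maximal runs of equal zero-ness, then filter/concatenate the runs, dropping zero runs of length >= min_consecutive.
import Mathlib
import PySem

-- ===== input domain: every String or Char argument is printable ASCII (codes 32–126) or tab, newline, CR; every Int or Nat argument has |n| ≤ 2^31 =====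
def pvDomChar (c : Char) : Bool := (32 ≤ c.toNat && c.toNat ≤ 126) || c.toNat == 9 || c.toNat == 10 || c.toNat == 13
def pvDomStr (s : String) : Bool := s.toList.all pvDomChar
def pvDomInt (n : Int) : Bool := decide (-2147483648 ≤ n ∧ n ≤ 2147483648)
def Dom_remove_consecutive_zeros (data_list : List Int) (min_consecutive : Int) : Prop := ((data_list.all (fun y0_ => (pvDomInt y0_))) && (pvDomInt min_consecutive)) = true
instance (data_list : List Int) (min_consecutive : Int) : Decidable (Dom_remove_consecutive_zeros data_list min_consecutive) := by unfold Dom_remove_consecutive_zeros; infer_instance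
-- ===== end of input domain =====

-- B replaces A's single-pass counter/buffer state machine by a staged run-length decomposition followed by a run filter (alternative decomposition, same cost).


-- ===== PORT A =====
-- one step of A's for-loop: state = (result, zero_count, temp_zeros)
def pvAStep (min_consecutive : Int) (st : List Int × Int × List Int) (value : Int) : List Int × Int × List Int :=
  if value = 0 then
    (st.1, st.2.1 + 1, st.2.2 ++ [value])
  else
    ((if 0 < st.2.1 ∧ st.2.1 < min_consecutive then st.1 ++ st.2.2 else st.1) ++ [value], 0, [])

def remove_consecutive_zeros (data_list : List Int) (min_consecutive : Int) : List Int :=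
  if data_list.isEmpty then data_list
  else
    let st := data_list.foldl (pvAStep min_consecutive) ([], 0, [])
    if 0 < st.2.1 ∧ st.2.1 < min_consecutive then st.1 ++ st.2.2 else st.1

-- ===== PORT B =====
-- stage-1 step: state = (runs, cur); cur is always nonempty (starts at [data_list[0]]), so cur[0] = cur.headD 1
def pvBStep (st : List (List Int) × List Int) (v : Int) : List (List Int) × List Int :=
  if decide (v = 0) = decide (st.2.headD 1 = 0) then (st.1, st.2 ++ [v]) else (st.1 ++ [st.2], [v])

-- stage-2 loop: every run is nonempty, so run[0] = run.headD 1
def pvStage2 (min_consecutive : Int) (out : List Int) (runs : List (List Int)) : List Int :=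
  runs.foldl (fun out run => if run.headD 1 ≠ 0 ∨ (run.length : Int) < min_consecutive then out ++ run else out) out

def remove_consecutive_zeros_alt (data_list : List Int) (min_consecutive : Int) : List Int :=
  match data_list with
  | [] => []
  | x :: rest =>
    let st := rest.foldl pvBStep ([], [x])
    pvStage2 min_consecutive [] (st.1 ++ [st.2])

-- ===== PRECONDITION & SPEC =====
def Spec_remove_consecutive_zeros (data_list : List Int) (min_consecutive : Int) (out : List Int) : Prop := out = remove_consecutive_zeros_alt data_list min_consecutive
instance (data_list : List Int) (min_consecutive : Int) (out : List Int) : Decidable (Spec_remove_consecutive_zeros data_list min_consecutive out) := by unfold Spec_remove_consecutive_zeros; infer_instance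

-- ===== CLAIM (what is proved, stated in full; the proofs are below) =====
def Claim_equal_remove_consecutive_zeros : Prop := ∀ (data_list : List Int) (min_consecutive : Int), Dom_remove_consecutive_zeros data_list min_consecutive → Spec_remove_consecutive_zeros data_list min_consecutive (remove_consecutive_zeros data_list min_consecutive)

-- ===== LEMMAS AND PROOFS =====

-- common reference function: remove zero runs, grouping the leading run
def pvSpec (m : Int) : List Int → List Int
  | [] => []
  | x :: t =>
    if x = 0 then
      (if ((t.takeWhile (· = 0)).length + 1 : Int) < m
       then List.replicate ((t.takeWhile (· = 0)).length + 1) 0 else []) ++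
      pvSpec m (t.dropWhile (· = 0))
    else x :: pvSpec m t
termination_by l => l.length
decreasing_by
  · exact Nat.lt_succ_of_le (List.length_dropWhile_le _ _)
  · simp

theorem pvSpec_nil (m : Int) : pvSpec m [] = [] := by rw [pvSpec]

theorem takeWhile_replicate_append (c : Nat) (v : Int) (t : List Int) (hv : v ≠ 0) :
    (List.replicate c (0:Int) ++ v :: t).takeWhile (· = 0) = List.replicate c 0 := by
  induction c with
  | zero => simp [hv]
  | succ k ih => simp [List.replicate_succ, ih]

theorem dropWhile_replicate_append (c : Nat) (v : Int) (t : List Int) (hv : v ≠ 0) :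
    (List.replicate c (0:Int) ++ v :: t).dropWhile (· = 0) = v :: t := by
  induction c with
  | zero => simp [hv]
  | succ k ih => simp [List.replicate_succ, ih]

theorem pvSpec_replicate (m : Int) (c : Nat) :
    pvSpec m (List.replicate c (0:Int)) =
      if 0 < c ∧ (c : Int) < m then List.replicate c 0 else [] := by
  cases c with
  | zero => simp [pvSpec_nil]
  | succ k =>
    have h1 : List.replicate (k+1) (0:Int) = 0 :: List.replicate k 0 := by simp [List.replicate_succ]
    rw [h1, pvSpec]
    simp only [List.takeWhile_replicate, List.dropWhile_replicate]
    norm_num [pvSpec_nil]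
    split_ifs <;> first | rfl | omega | (exfalso; omega)

theorem pvSpec_replicate_cons (m : Int) (c : Nat) (v : Int) (t : List Int) (hv : v ≠ 0) :
    pvSpec m (List.replicate c (0:Int) ++ v :: t) =
      (if 0 < c ∧ (c : Int) < m then List.replicate c 0 else []) ++ v :: pvSpec m t := by
  cases c with
  | zero => simp [pvSpec, hv]
  | succ k =>
    have h1 : List.replicate (k+1) (0:Int) ++ v :: t = 0 :: (List.replicate k 0 ++ v :: t) := by
      rw [List.replicate_succ]; simp
    rw [h1, pvSpec]
    rw [takeWhile_replicate_append k v t hv, dropWhile_replicate_append k v t hv,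
        pvSpec]
    simp only [if_neg hv, List.length_replicate]
    split_ifs <;> first | rfl | (exfalso; push_cast at *; omega)

-- A's fold, started with c pending zeros, computes pvSpec of the list with those zeros restored
theorem pvA_inv (m : Int) (xs : List Int) : ∀ (res : List Int) (c : Nat),
    (let st := xs.foldl (pvAStep m) (res, (c : Int), List.replicate c 0)
     if 0 < st.2.1 ∧ st.2.1 < m then st.1 ++ st.2.2 else st.1)
      = res ++ pvSpec m (List.replicate c 0 ++ xs) := by
  induction xs with
  | nil =>
    intro res c
    simp only [List.foldl_nil, List.append_nil, pvSpec_replicate]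
    split_ifs <;> simp_all <;> omega
  | cons x t ih =>
    intro res c
    by_cases hx : x = 0
    · subst hx
      have h1 : List.replicate c (0:Int) ++ 0 :: t = List.replicate (c+1) 0 ++ t := by
        rw [List.replicate_succ']; simp
      simp only [List.foldl_cons, pvAStep, if_pos rfl, h1]
      have h2 : ((c : Int) + 1) = ((c + 1 : Nat) : Int) := by push_cast; ring
      have h3 : List.replicate c (0:Int) ++ [0] = List.replicate (c+1) 0 := by
        rw [List.replicate_succ']
      rw [h2, h3]
      exact ih res (c + 1)
    · simp only [List.foldl_cons, pvAStep, if_neg hx]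
      have hih := ih ((if 0 < (c:Int) ∧ (c:Int) < m then res ++ List.replicate c 0 else res) ++ [x]) 0
      simp only [List.replicate_zero, List.nil_append, Nat.cast_zero] at hih
      rw [hih, pvSpec_replicate_cons m c x t hx]
      split_ifs <;> simp_all <;> omega

-- pvSpec passes an all-non-zero prefix through unchanged
theorem pvSpec_nonzero_append (m : Int) (p t : List Int) (hp : ∀ x ∈ p, x ≠ 0) :
    pvSpec m (p ++ t) = p ++ pvSpec m t := by
  induction p with
  | nil => simp
  | cons x q ih =>
    have hx : x ≠ 0 := hp x (by simp)
    rw [List.cons_append, pvSpec, if_neg hx, ih (fun y hy => hp y (by simp [hy]))]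
    simp

-- stage 2 with any accumulator = accumulator ++ stage 2 from []
theorem pvStage2_out (m : Int) (runs : List (List Int)) : ∀ (out : List Int),
    pvStage2 m out runs = out ++ pvStage2 m [] runs := by
  induction runs with
  | nil => intro out; simp [pvStage2]
  | cons r rs ih =>
    intro out
    simp only [pvStage2, List.foldl_cons] at *
    rw [ih, ih (if _ ∨ _ then [] ++ r else [])]
    split_ifs <;> simp

theorem pvStage2_snoc (m : Int) (runs : List (List Int)) (r : List Int) :
    pvStage2 m [] (runs ++ [r]) =
      pvStage2 m [] runs ++ (if r.headD 1 ≠ 0 ∨ (r.length : Int) < m then r else []) := by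
  simp only [pvStage2, List.foldl_append, List.foldl_cons, List.foldl_nil]
  rw [← pvStage2, pvStage2_out]
  split_ifs <;> simp

-- the "keep" decision of stage 2 equals pvSpec on one constant run
theorem pvKeep_eq_spec (m : Int) (cur : List Int) (hne : cur ≠ [])
    (hc : (∀ x ∈ cur, x = 0) ∨ (∀ x ∈ cur, x ≠ 0)) :
    (if cur.headD 1 ≠ 0 ∨ ((cur.length : Int)) < m then cur else []) = pvSpec m cur := by
  rcases hc with hz | hnz
  · have hrep : cur = List.replicate cur.length 0 := List.eq_replicate_of_mem hz
    have hlen : 0 < cur.length := List.length_pos_iff.mpr hne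
    have hhead : cur.headD 1 = 0 := by
      cases cur with
      | nil => exact absurd rfl hne
      | cons a t => exact hz a (by simp)
    rw [hhead]
    conv_rhs => rw [hrep]
    rw [pvSpec_replicate]
    conv_lhs => rw [hrep]
    simp only [List.length_replicate]
    split_ifs <;> first | rfl | omega | (exfalso; omega)
  · have hhead : cur.headD 1 ≠ 0 := by
      cases cur with
      | nil => exact absurd rfl hne
      | cons a t => exact hnz a (by simp)
    rw [if_pos (Or.inl hhead)]
    have := pvSpec_nonzero_append m cur [] hnz
    simp [pvSpec_nil] at this
    exact this.symm

-- splitting a constant run off the front of pvSpec, when the next element flips zero-ness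
theorem pvSpec_split (m : Int) (cur : List Int) (v : Int) (t : List Int) (hne : cur ≠ [])
    (hc : (∀ x ∈ cur, x = 0) ∨ (∀ x ∈ cur, x ≠ 0))
    (hflip : decide (v = 0) ≠ decide (cur.headD 1 = 0)) :
    pvSpec m (cur ++ v :: t) =
      (if cur.headD 1 ≠ 0 ∨ ((cur.length : Int)) < m then cur else []) ++ pvSpec m (v :: t) := by
  rcases hc with hz | hnz
  · have hrep : cur = List.replicate cur.length 0 := List.eq_replicate_of_mem hz
    have hlen : 0 < cur.length := List.length_pos_iff.mpr hne
    have hhead : cur.headD 1 = 0 := by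
      cases cur with
      | nil => exact absurd rfl hne
      | cons a t => exact hz a (by simp)
    have hv : v ≠ 0 := by
      intro h; apply hflip; rw [h, hhead]
    conv_lhs => rw [hrep]
    rw [pvSpec_replicate_cons m cur.length v t hv, hhead]
    conv_rhs => rw [hrep]
    simp only [ne_eq, not_true_eq_false, false_or, List.length_replicate]
    have hspec : pvSpec m (v :: t) = v :: pvSpec m t := by rw [pvSpec, if_neg hv]
    rw [hspec]
    split_ifs <;> first | rfl | omega | (exfalso; omega)
  · have hhead : cur.headD 1 ≠ 0 := by
      cases cur with
      | nil => exact absurd rfl hne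
      | cons a t => exact hnz a (by simp)
    rw [pvSpec_nonzero_append m cur (v :: t) hnz, if_pos (Or.inl hhead)]

-- B's staged pipeline, from any intermediate state, computes pvSpec of the remaining input
theorem pvB_inv (m : Int) (rest : List Int) : ∀ (runs : List (List Int)) (cur : List Int),
    cur ≠ [] → ((∀ x ∈ cur, x = 0) ∨ (∀ x ∈ cur, x ≠ 0)) →
    pvStage2 m [] ((rest.foldl pvBStep (runs, cur)).1 ++ [(rest.foldl pvBStep (runs, cur)).2])
      = pvStage2 m [] runs ++ pvSpec m (cur ++ rest) := by
  induction rest with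
  | nil =>
    intro runs cur hne hc
    simp only [List.foldl_nil, List.append_nil]
    rw [pvStage2_snoc, pvKeep_eq_spec m cur hne hc]
  | cons v t ih =>
    intro runs cur hne hc
    simp only [List.foldl_cons, pvBStep]
    by_cases hd : decide (v = 0) = decide (cur.headD 1 = 0)
    · rw [if_pos hd]
      have hiff : (v = 0) ↔ (cur.headD 1 = 0) := by simpa using hd
      have hne' : cur ++ [v] ≠ [] := by simp
      have hc' : (∀ x ∈ cur ++ [v], x = 0) ∨ (∀ x ∈ cur ++ [v], x ≠ 0) := by
        have hhead : cur.headD 1 = 0 ∨ cur.headD 1 ≠ 0 := em _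
        rcases hc with hz | hnz
        · left
          intro x hx
          rcases List.mem_append.mp hx with h | h
          · exact hz x h
          · have hh : cur.headD 1 = 0 := by
              cases cur with
              | nil => exact absurd rfl hne
              | cons a s => exact hz a (by simp)
            simp only [List.mem_singleton] at h
            subst h
            exact hiff.mpr hh
        · right
          intro x hx
          rcases List.mem_append.mp hx with h | h
          · exact hnz x h
          · have hh : cur.headD 1 ≠ 0 := by
              cases cur with
              | nil => exact absurd rfl hne
              | cons a s => exact hnz a (by simp)
            simp only [List.mem_singleton] at h
            subst h
            exact fun h' => hh (hiff.mp h')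
      have := ih runs (cur ++ [v]) hne' hc'
      rw [this]
      simp
    · rw [if_neg hd]
      have := ih (runs ++ [cur]) [v] (by simp) (by
        by_cases hv : v = 0
        · left; intro x hx; simp only [List.mem_singleton] at hx; rw [hx, hv]
        · right; intro x hx; simp only [List.mem_singleton] at hx; rw [hx]; exact hv)
      rw [this, pvStage2_snoc, pvSpec_split m cur v t hne hc hd]
      simp

-- ===== VERDICT (by name: the statement is the Claim_ definition above) =====
theorem remove_consecutive_zeros_spec : Claim_equal_remove_consecutive_zeros := by
  intro data_list min_consecutive _
  unfold Spec_remove_consecutive_zeros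
  unfold remove_consecutive_zeros remove_consecutive_zeros_alt
  cases data_list with
  | nil => simp
  | cons x rest =>
    simp only [List.isEmpty_cons, if_neg Bool.false_ne_true]
    have hA := pvA_inv min_consecutive (x :: rest) [] 0
    simp only [List.replicate_zero, List.nil_append, Nat.cast_zero] at hA
    have hB := pvB_inv min_consecutive rest [] [x] (by simp) (by
      by_cases hv : x = 0
      · left; intro y hy; simp only [List.mem_singleton] at hy; rw [hy, hv]
      · right; intro y hy; simp only [List.mem_singleton] at hy; rw [hy]; exact hv)
    simp only [pvStage2, List.foldl_nil, List.singleton_append] at hB ⊢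
    rw [hB, ← hA]
    simp
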